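-- pv_equiv track=rewrite | github.com/Tsarcasm831/Temp | scripts/rebuild_assets_100m_unique.py | choose_folder
-- ===== SOURCE A (Python) =====
-- from typing import Dict, List, Tuple
--
-- orig_to_folder = {
--     "Konoha Riverbank": "konoha_riverbank",
--     "Hidden Leaf Riverbank": "konoha_riverbank",
--     "Konoha Shrine Pond": "konoha_shrine_pond",
--     "Konoha Garden Pools": "konoha_shrine_pond",
--     "Konoha Estuary": "konoha_estuary",
--     "Hidden Leaf Estuary": "konoha_estuary",
--     "Sand Shelf": "suna_dunes_shelf",
--     "Sand Shelf Edges": "suna_dunes_shelf",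
--     "Reef Outcrops": "suna_dunes_shelf",
--     "Mistfall Bay": "kiri_mistfall_bay",
--     "Open Ocean Currents": "kiri_mistfall_bay",
--     "Cloud": "kumo_cloud_gulf",
--     "Open Ocean Schools": "kumo_cloud_gulf",
--     "Reef Caves": "iwa_stone_caves",
--     "Hidden Stone Shelves": "iwa_stone_caves",
--     "Far Haven Trench": "otogakure_trench",
--     "Night Trench": "otogakure_trench",
--     "Whitehorse Shoals": "tenkawa_shoals",
--     "Coastal Shoals": "tenkawa_shoals",
--     "Mount Myoboku": "myoboku_peak",
--     "Abyssal Flats": "myoboku_peak",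
-- }
--
-- def choose_folder(spawn_list: List[str]) -> str:
--     # Collect all candidate folders by substring match; select by longest pattern then fixed priority
--     candidates: List[Tuple[int, str]] = []  # (pattern_len, folder)
--     s_join = " | ".join([str(s) for s in (spawn_list or [])]).lower()
--     for pat, folder in orig_to_folder.items():
--         if pat.lower() in s_join:
--             candidates.append((len(pat), folder))
--     if not candidates:
--         return "tenkawa_shoals"
--     candidates.sort(key=lambda x: (-x[0], x[1]))
--     return candidates[0][1]
-- ===== SOURCE B (Python) =====
-- from typing import List
--
-- orig_to_folder = {
--     "Konoha Riverbank": "konoha_riverbank",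
--     "Hidden Leaf Riverbank": "konoha_riverbank",
--     "Konoha Shrine Pond": "konoha_shrine_pond",
--     "Konoha Garden Pools": "konoha_shrine_pond",
--     "Konoha Estuary": "konoha_estuary",
--     "Hidden Leaf Estuary": "konoha_estuary",
--     "Sand Shelf": "suna_dunes_shelf",
--     "Sand Shelf Edges": "suna_dunes_shelf",
--     "Reef Outcrops": "suna_dunes_shelf",
--     "Mistfall Bay": "kiri_mistfall_bay",
--     "Open Ocean Currents": "kiri_mistfall_bay",
--     "Cloud": "kumo_cloud_gulf",
--     "Open Ocean Schools": "kumo_cloud_gulf",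
--     "Reef Caves": "iwa_stone_caves",
--     "Hidden Stone Shelves": "iwa_stone_caves",
--     "Far Haven Trench": "otogakure_trench",
--     "Night Trench": "otogakure_trench",
--     "Whitehorse Shoals": "tenkawa_shoals",
--     "Coastal Shoals": "tenkawa_shoals",
--     "Mount Myoboku": "myoboku_peak",
--     "Abyssal Flats": "myoboku_peak",
-- }
--
-- def choose_folder(spawn_list: List[str]) -> str:
--     # Single pass: track the best (longest pattern, lexicographically smallest folder) match.
--     s_join = " | ".join(spawn_list).lower()
--     best = None  # (pattern_len, folder) of the best match so far
--     for pat, folder in orig_to_folder.items():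
--         if pat.lower() in s_join:
--             n = len(pat)
--             if best is None or n > best[0] or (n == best[0] and folder < best[1]):
--                 best = (n, folder)
--     return best[1] if best is not None else "tenkawa_shoals"
-- ===== Notes on version B (the rewrite author's own statement) =====
-- stated objective: simpler
-- what changed: B drops A's candidates list and the final sort: it keeps a running best (longest pattern, lexicographically smallest folder on ties) in one pass over the pattern table.
import Mathlib
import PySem

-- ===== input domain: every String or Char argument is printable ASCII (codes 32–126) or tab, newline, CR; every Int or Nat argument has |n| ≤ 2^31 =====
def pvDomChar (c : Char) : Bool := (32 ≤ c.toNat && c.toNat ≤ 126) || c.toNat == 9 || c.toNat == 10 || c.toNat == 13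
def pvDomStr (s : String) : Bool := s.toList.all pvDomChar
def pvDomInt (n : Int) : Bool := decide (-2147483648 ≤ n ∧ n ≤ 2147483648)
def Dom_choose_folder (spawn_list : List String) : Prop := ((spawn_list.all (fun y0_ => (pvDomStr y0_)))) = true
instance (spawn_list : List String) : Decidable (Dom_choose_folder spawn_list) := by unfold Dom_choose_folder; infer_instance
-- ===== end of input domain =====

-- B replaces A's collect-candidates-then-sort with a single running-best pass (objective: simpler).

-- module-level constant orig_to_folder (a dict literal with distinct keys; items() is this list in order)
def orig_to_folder : PySem.Dict String String := PySem.Dict.mk [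
  ("Konoha Riverbank", "konoha_riverbank"),
  ("Hidden Leaf Riverbank", "konoha_riverbank"),
  ("Konoha Shrine Pond", "konoha_shrine_pond"),
  ("Konoha Garden Pools", "konoha_shrine_pond"),
  ("Konoha Estuary", "konoha_estuary"),
  ("Hidden Leaf Estuary", "konoha_estuary"),
  ("Sand Shelf", "suna_dunes_shelf"),
  ("Sand Shelf Edges", "suna_dunes_shelf"),
  ("Reef Outcrops", "suna_dunes_shelf"),
  ("Mistfall Bay", "kiri_mistfall_bay"),
  ("Open Ocean Currents", "kiri_mistfall_bay"),
  ("Cloud", "kumo_cloud_gulf"),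
  ("Open Ocean Schools", "kumo_cloud_gulf"),
  ("Reef Caves", "iwa_stone_caves"),
  ("Hidden Stone Shelves", "iwa_stone_caves"),
  ("Far Haven Trench", "otogakure_trench"),
  ("Night Trench", "otogakure_trench"),
  ("Whitehorse Shoals", "tenkawa_shoals"),
  ("Coastal Shoals", "tenkawa_shoals"),
  ("Mount Myoboku", "myoboku_peak"),
  ("Abyssal Flats", "myoboku_peak")]

-- ===== PORT A =====
-- s_join = " | ".join([str(s) for s in (spawn_list or [])]).lower()  (str(s) is the identity on
-- strings; 'spawn_list or []' is the identity on lists of strings when empty)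
def choose_folder (spawn_list : List String) : String :=
  let s_join : List Char := PySem.Chars.lower (PySem.Chars.join " | ".toList (spawn_list.map String.toList))
  -- candidates: List (pattern_len, folder), built by appending on each substring match
  let candidates : List (Int × String) :=
    orig_to_folder.items.foldl
      (fun acc pf =>
        if PySem.Chars.isIn (PySem.Chars.lower pf.1.toList) s_join
        then acc ++ [((pf.1.toList.length : Int), pf.2)] else acc) []
  if candidates = [] then "tenkawa_shoals"
  else
    -- candidates.sort(key=lambda x: (-x[0], x[1])); return candidates[0][1]
    match PySem.List.sorted2 candidates (fun x => -x.1) (fun x => x.2) with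
    | [] => "tenkawa_shoals"   -- unreachable: sorted2 of a nonempty list is nonempty
    | c :: _ => c.2

-- ===== PORT B =====
def choose_folder_alt (spawn_list : List String) : String :=
  let s_join : List Char := PySem.Chars.lower (PySem.Chars.join " | ".toList (spawn_list.map String.toList))
  let best : Option (Nat × String) :=
    orig_to_folder.items.foldl
      (fun best pf =>
        if PySem.Chars.isIn (PySem.Chars.lower pf.1.toList) s_join then
          let n := pf.1.toList.length
          match best with
          | none => some (n, pf.2)
          | some b => if n > b.1 ∨ (n = b.1 ∧ pf.2 < b.2) then some (n, pf.2) else some b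
        else best) none
  match best with
  | some b => b.2
  | none => "tenkawa_shoals"

-- ===== PRECONDITION & SPEC =====
def Spec_choose_folder (spawn_list : List String) (out : String) : Prop := out = choose_folder_alt spawn_list
instance (spawn_list : List String) (out : String) : Decidable (Spec_choose_folder spawn_list out) := by unfold Spec_choose_folder; infer_instance

-- ===== CLAIM (what is proved, stated in full; the proofs are below) =====
def Claim_equal_choose_folder : Prop := ∀ (spawn_list : List String), Dom_choose_folder spawn_list → Spec_choose_folder spawn_list (choose_folder spawn_list)

-- ===== LEMMAS AND PROOFS =====

-- guarded append-fold = filter-then-map (A's candidates list)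
theorem pv_foldl_append_if_filter {α β : Type} (c : α → Bool) (f : α → β) (L : List α) :
    ∀ acc : List β,
      L.foldl (fun acc x => if c x then acc ++ [f x] else acc) acc
        = acc ++ (L.filter c).map f := by
  induction L with
  | nil => intro acc; simp
  | cons x t ih =>
    intro acc
    by_cases h : c x = true <;> simp [List.foldl, h, ih]

-- guarded fold = fold over the filtered list (B's loop)
theorem pv_foldl_if_filter {α β : Type} (c : α → Bool) (u : β → α → β) (L : List α) :
    ∀ b : β,
      L.foldl (fun b x => if c x then u b x else b) b = (L.filter c).foldl u b := by
  induction L with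
  | nil => intro b; simp
  | cons x t ih =>
    intro b
    by_cases h : c x = true <;> simp [List.foldl, h, ih]

-- head of insertBy
theorem pv_head?_insertBy {α : Type} (before : α → α → Bool) (x : α) (acc : List α) :
    (PySem.List.insertBy before x acc).head?
      = some (acc.head?.elim x (fun h => if before x h then x else h)) := by
  cases acc with
  | nil => simp [PySem.List.insertBy]
  | cons h t =>
    by_cases hb : before x h = true <;> simp [PySem.List.insertBy, hb]

-- head of an insertion-sort fold is the running minimum under `before`
theorem pv_head?_foldl_insertBy {α : Type} (before : α → α → Bool) (L : List α) :
    ∀ acc : List α,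
      (L.foldl (fun a x => PySem.List.insertBy before x a) acc).head?
        = L.foldl (fun b x => some (b.elim x (fun h => if before x h then x else h))) acc.head? := by
  induction L with
  | nil => intro acc; simp
  | cons x t ih =>
    intro acc
    simp only [List.foldl]
    rw [ih, pv_head?_insertBy]

-- A's comparator "(-len, folder) lexicographically smaller" is B's "strictly better" test
theorem pv_cond_eq (l bl : Nat) (s bs : String) :
    (decide (-(l : Int) < -(bl : Int)) || (!decide (-(bl : Int) < -(l : Int)) && decide (s < bs)))
      = decide (l > bl ∨ (l = bl ∧ s < bs)) := by
  rcases Nat.lt_trichotomy bl l with h | h | h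
  · rw [decide_eq_true (show -(l : Int) < -(bl : Int) by omega), Bool.true_or,
        decide_eq_true (Or.inl h)]
  · rw [decide_eq_false (show ¬ -(l : Int) < -(bl : Int) by omega), Bool.false_or,
        decide_eq_false (show ¬ -(bl : Int) < -(l : Int) by omega)]
    by_cases hs : s < bs
    · rw [decide_eq_true hs, decide_eq_true (Or.inr ⟨h.symm, hs⟩), Bool.not_false, Bool.true_and]
    · rw [decide_eq_false hs, decide_eq_false (by
          rintro (hc | ⟨-, hc⟩)
          · omega
          · exact hs hc), Bool.and_false]
  · rw [decide_eq_false (show ¬ -(l : Int) < -(bl : Int) by omega), Bool.false_or,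
        decide_eq_true (show -(bl : Int) < -(l : Int) by omega), Bool.not_true, Bool.false_and,
        decide_eq_false (by intro hc; rcases hc with hc | hc <;> omega)]

-- the two running-best folds agree, through the embedding (l, f) ↦ ((l : Int), f)
theorem pv_best_bridge (F : List (String × String)) :
    ∀ bN : Option (Nat × String),
      ((F.map (fun pf => ((pf.1.toList.length : Int), pf.2))).foldl
        (fun b x => some (b.elim x (fun h =>
          if (decide (-x.1 < -h.1) || (!decide (-h.1 < -x.1) && decide (x.2 < h.2))) then x else h)))
        (bN.map (fun b => ((b.1 : Int), b.2))))
      = (F.foldl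
          (fun best pf =>
            match best with
            | none => some (pf.1.toList.length, pf.2)
            | some b => if pf.1.toList.length > b.1 ∨ (pf.1.toList.length = b.1 ∧ pf.2 < b.2)
                        then some (pf.1.toList.length, pf.2) else some b)
          bN).map (fun b => ((b.1 : Int), b.2)) := by
  induction F with
  | nil => intro bN; simp
  | cons pf t ih =>
    intro bN
    simp only [List.map_cons, List.foldl_cons]
    rw [← ih]
    congr 1
    cases bN with
    | none => rfl
    | some b =>
      show some (if (decide (-(pf.1.toList.length : Int) < -((b.1 : Int)))
            || (!decide (-((b.1 : Int)) < -(pf.1.toList.length : Int)) && decide (pf.2 < b.2)))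
          then ((pf.1.toList.length : Int), pf.2) else ((b.1 : Int), b.2))
        = Option.map (fun b => ((b.1 : Int), b.2))
            (if pf.1.toList.length > b.1 ∨ (pf.1.toList.length = b.1 ∧ pf.2 < b.2)
             then some (pf.1.toList.length, pf.2) else some b)
      rw [pv_cond_eq]
      by_cases hc : (pf.1.toList.length > b.1 ∨ (pf.1.toList.length = b.1 ∧ pf.2 < b.2))
      · rw [if_pos (decide_eq_true hc), if_pos hc]; rfl
      · rw [if_neg (by rw [decide_eq_false hc]; exact Bool.false_ne_true), if_neg hc]; rfl

-- B's fold never comes back from `some`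
theorem pv_foldl_u_some (t : List (String × String)) :
    ∀ b : Nat × String,
      ∃ b', t.foldl
          (fun best pf =>
            match best with
            | none => some (pf.1.toList.length, pf.2)
            | some b => if pf.1.toList.length > b.1 ∨ (pf.1.toList.length = b.1 ∧ pf.2 < b.2)
                        then some (pf.1.toList.length, pf.2) else some b)
          (some b) = some b' := by
  induction t with
  | nil => intro b; exact ⟨b, rfl⟩
  | cons x s ih =>
    intro b
    simp only [List.foldl_cons]
    by_cases hc : (x.1.toList.length > b.1 ∨ (x.1.toList.length = b.1 ∧ x.2 < b.2))
    · show ∃ b', List.foldl _ (if x.1.toList.length > b.1 ∨ (x.1.toList.length = b.1 ∧ x.2 < b.2)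
          then some (x.1.toList.length, x.2) else some b) s = some b'
      rw [if_pos hc]; exact ih _
    · show ∃ b', List.foldl _ (if x.1.toList.length > b.1 ∨ (x.1.toList.length = b.1 ∧ x.2 < b.2)
          then some (x.1.toList.length, x.2) else some b) s = some b'
      rw [if_neg hc]; exact ih _

-- the head of A's sorted candidate list, as a running-minimum fold
theorem pv_head?_sorted2 (M : List (Int × String)) :
    (PySem.List.sorted2 M (fun x => -x.1) (fun x => x.2)).head?
      = M.foldl (fun b x => some (b.elim x (fun h =>
          if (decide (-x.1 < -h.1) || (!decide (-h.1 < -x.1) && decide (x.2 < h.2))) then x else h))) none := by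
  have hrfl : (PySem.List.sorted2 M (fun x => -x.1) (fun x => x.2)).head?
      = ((M.foldl (fun a x => PySem.List.insertBy
          (fun a b : Int × String =>
            (decide (-a.1 < -b.1) || (!decide (-b.1 < -a.1) && decide (a.2 < b.2)))) x a) [])).head? := rfl
  rw [hrfl]
  simpa using pv_head?_foldl_insertBy
    (fun a b : Int × String =>
      (decide (-a.1 < -b.1) || (!decide (-b.1 < -a.1) && decide (a.2 < b.2)))) M []

-- the heart of the equivalence, for an arbitrary match predicate over the table
theorem pv_main (cnd : String × String → Bool) (T : List (String × String)) :
    (if (T.foldl (fun acc pf => if cnd pf then acc ++ [((pf.1.toList.length : Int), pf.2)] else acc)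
          ([] : List (Int × String))) = [] then "tenkawa_shoals"
     else
       match PySem.List.sorted2
           (T.foldl (fun acc pf => if cnd pf then acc ++ [((pf.1.toList.length : Int), pf.2)] else acc) [])
           (fun x => -x.1) (fun x => x.2) with
       | [] => "tenkawa_shoals"
       | c :: _ => c.2)
    = (match T.foldl
          (fun best pf =>
            if cnd pf then
              match best with
              | none => some (pf.1.toList.length, pf.2)
              | some b => if pf.1.toList.length > b.1 ∨ (pf.1.toList.length = b.1 ∧ pf.2 < b.2)
                          then some (pf.1.toList.length, pf.2) else some b
            else best)
          (none : Option (Nat × String)) with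
       | some b => b.2
       | none => "tenkawa_shoals") := by
  rw [pv_foldl_append_if_filter, pv_foldl_if_filter, List.nil_append]
  cases hFc : T.filter cnd with
  | nil => rw [List.map_nil, if_pos rfl]; rfl
  | cons pf0 t =>
    have hne : (pf0 :: t).map (fun pf => ((pf.1.toList.length : Int), pf.2)) ≠ [] := by simp
    rw [if_neg hne]
    obtain ⟨best, hBv⟩ := pv_foldl_u_some t (pf0.1.toList.length, pf0.2)
    have hBv' : (pf0 :: t).foldl
        (fun best pf =>
          match best with
          | none => some (pf.1.toList.length, pf.2)
          | some b => if pf.1.toList.length > b.1 ∨ (pf.1.toList.length = b.1 ∧ pf.2 < b.2)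
                      then some (pf.1.toList.length, pf.2) else some b)
        none = some best := hBv
    have h1 : (PySem.List.sorted2 ((pf0 :: t).map (fun pf => ((pf.1.toList.length : Int), pf.2)))
          (fun x => -x.1) (fun x => x.2)).head? = some ((best.1 : Int), best.2) := by
      rw [pv_head?_sorted2]
      have hb := pv_best_bridge (pf0 :: t) none
      rw [hBv'] at hb
      simpa using hb
    rw [hBv']
    cases hss : PySem.List.sorted2 ((pf0 :: t).map (fun pf => ((pf.1.toList.length : Int), pf.2)))
        (fun x => -x.1) (fun x => x.2) with
    | nil => rw [hss] at h1; simp at h1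
    | cons c cs =>
      rw [hss] at h1
      simp only [List.head?_cons, Option.some.injEq] at h1
      rw [h1]

-- ===== VERDICT (by name: the statement is the Claim_ definition above) =====
theorem choose_folder_spec : Claim_equal_choose_folder := by
  intro spawn_list _
  unfold Spec_choose_folder choose_folder choose_folder_alt
  exact pv_main
    (fun pf => PySem.Chars.isIn (PySem.Chars.lower pf.1.toList)
      (PySem.Chars.lower (PySem.Chars.join " | ".toList (spawn_list.map String.toList))))
    orig_to_folder.items
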